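-- pv_equiv track=rewrite | github.com/VGaftoniuc/challenges | 270/freq.py | freq_digit
-- ===== SOURCE A (Python) =====
-- def freq_digit(num: int) -> int:
--     digits = list(str(num))
--     result = 0
--     base_count = 0
--     for digit in digits:
--         count = digits.count(digit)
--         if count > base_count:
--             base_count = count
--             result = int(digit)
--     return result
-- ===== SOURCE B (Python) =====
-- def freq_digit(num: int) -> int:
--     s = str(num)
--     counts = {}
--     for ch in s:
--         counts[ch] = counts.get(ch, 0) + 1
--     m = max(counts.values())
--     for ch in s:
--         if counts[ch] == m:
--             return int(ch)
-- ===== Notes on version B (the rewrite author's own statement) =====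
-- stated objective: idiomatic
-- what changed: A rescans the digit list with .count for every digit and keeps a strict-improvement argmax; B builds a char->count dict in one pass, takes max of its values, and returns the first char whose count equals that max.
import Mathlib
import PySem

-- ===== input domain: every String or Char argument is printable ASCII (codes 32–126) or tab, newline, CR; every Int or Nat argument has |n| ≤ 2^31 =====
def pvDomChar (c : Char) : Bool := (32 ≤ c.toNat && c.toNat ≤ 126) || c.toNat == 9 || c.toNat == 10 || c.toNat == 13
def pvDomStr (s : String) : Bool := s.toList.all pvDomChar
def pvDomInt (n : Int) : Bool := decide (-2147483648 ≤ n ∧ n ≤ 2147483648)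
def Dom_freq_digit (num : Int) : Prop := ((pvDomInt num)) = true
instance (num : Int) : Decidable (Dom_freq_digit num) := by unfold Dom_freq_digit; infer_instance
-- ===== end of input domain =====

-- B replaces A's per-digit rescan-and-strict-improve loop with one counting pass into a
-- dict, a max over the counts, and a single scan for the first char attaining it
-- (objective: idiomatic). Equivalence is about the return value.

-- ===== PORT A =====
def freq_digit (num : Int) : Int :=
  let digits := (PySem.Int.toStr num).toList
  let st := digits.foldl (fun (st : Int × Int) digit =>
      let count : Int := PySem.List.count digits digit
      -- int(digit): ofChars? is none only for non-digit chars ('-'), excluded by Pre_; getD 0 is unreachable there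
      if count > st.2 then ((PySem.Int.ofChars? [digit]).getD 0, count) else st)
    (0, 0)
  st.1

-- ===== PORT B =====
def freq_digit_alt (num : Int) : Int :=
  let s := (PySem.Int.toStr num).toList
  let counts := s.foldl (fun d ch => d.insert ch (d.getD ch 0 + 1)) (PySem.Dict.empty : PySem.Dict Char Int)
  match PySem.List.max? counts.values (fun x => x) with
  | none => 0      -- unreachable: str(num) is never empty
  | some m =>
    match s.find? (fun ch => counts.getD ch 0 == m) with
    | some ch => (PySem.Int.ofChars? [ch]).getD 0   -- int(ch); getD 0 unreachable under Pre_
    | none => 0    -- unreachable: m is one of the counts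

-- ===== PRECONDITION & SPEC =====
-- Pre_ excludes negative num, on which Python A raises ValueError (int('-')).
def Pre_freq_digit (num : Int) : Prop := 0 ≤ num
instance (num : Int) : Decidable (Pre_freq_digit num) := by unfold Pre_freq_digit; infer_instance
def pvWitness_freq_digit : Int := (122333)

def Spec_freq_digit (num : Int) (out : Int) : Prop := out = freq_digit_alt num
instance (num : Int) (out : Int) : Decidable (Spec_freq_digit num out) := by unfold Spec_freq_digit; infer_instance

-- ===== CLAIM (what is proved, stated in full; the proofs are below) =====
def Claim_equal_freq_digit : Prop := ∀ (num : Int), Dom_freq_digit num → Pre_freq_digit num → Spec_freq_digit num (freq_digit num)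

-- ===== LEMMAS AND PROOFS =====

-- Once the running best count b dominates every remaining count, A's loop no longer updates.
theorem foldl_no_update (conv : Char → Int) (f : Char → Int) (t : List Char) :
    ∀ (r b : Int), (∀ d ∈ t, f d ≤ b) →
    t.foldl (fun (st : Int × Int) d => if f d > st.2 then (conv d, f d) else st) (r, b) = (r, b) := by
  induction t with
  | nil => intro r b _; rfl
  | cons c t ih =>
    intro r b h
    simp only [List.foldl_cons]
    rw [if_neg (by have := h c (by simp); simp; omega)]
    exact ih r b (fun d hd => h d (by simp [hd]))

-- A's strict-improvement loop ends at the FIRST element whose count equals the maximum m.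
theorem foldl_freq_spec (conv : Char → Int) (f : Char → Int) (m : Int) :
    ∀ (t : List Char) (r b : Int) (w : Char),
    (∀ d ∈ t, f d ≤ m) → t.find? (fun c => f c == m) = some w → b < m →
    t.foldl (fun (st : Int × Int) d => if f d > st.2 then (conv d, f d) else st) (r, b) = (conv w, m) := by
  intro t
  induction t with
  | nil => intro r b w _ hw _; simp at hw
  | cons c t ih =>
    intro r b w hle hw hb
    simp only [List.foldl_cons]
    by_cases hc : f c = m
    · have hwc : w = c := by
        rw [List.find?_cons_of_pos (by simp [hc])] at hw
        exact (Option.some.inj hw).symm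
      subst hwc
      rw [if_pos (by simpa [hc] using hb), hc]
      exact foldl_no_update conv f t (conv w) m (fun d hd => hle d (by simp [hd]))
    · have hw' : t.find? (fun c => f c == m) = some w := by
        rwa [List.find?_cons_of_neg (by simp [hc])] at hw
      have hcm : f c < m := lt_of_le_of_ne (hle c (by simp)) hc
      by_cases h2 : f c > b
      · rw [if_pos (by simpa using h2)]
        exact ih (conv c) (f c) w (fun d hd => hle d (by simp [hd])) hw' hcm
      · rw [if_neg (by simpa using h2)]
        exact ih r b w (fun d hd => hle d (by simp [hd])) hw' hb

theorem freq_digit_eq (num : Int) : freq_digit num = freq_digit_alt num := by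
  unfold freq_digit freq_digit_alt
  set l := (PySem.Int.toStr num).toList with hl
  simp only [PySem.Dict.foldl_insert_getD_add_one_eq_counter]
  have hvals : (PySem.Dict.counter l).values
      = (PySem.Set.ofList l).map (fun k => ((List.count k l : Nat) : Int)) := by
    simp [PySem.Dict.values, PySem.Dict.items_counter, List.map_map, Function.comp]
  rw [hvals]
  cases hmax : PySem.List.max? ((PySem.Set.ofList l).map (fun k => ((List.count k l : Nat) : Int))) (fun x => x) with
  | none =>
    dsimp only
    have hnil : (PySem.Set.ofList l).map (fun k => ((List.count k l : Nat) : Int)) = [] :=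
      (PySem.List.max?_eq_none_iff _ _).mp hmax
    have hl0 : l = [] := by
      cases hcase : l with
      | nil => rfl
      | cons c t =>
        exfalso
        have hc : c ∈ PySem.Set.ofList l := (PySem.Set.mem_ofList l c).mpr (by simp [hcase])
        have : ((List.count c l : Nat) : Int) ∈ (PySem.Set.ofList l).map (fun k => ((List.count k l : Nat) : Int)) :=
          List.mem_map_of_mem hc
        rw [hnil] at this
        simp at this
    rw [hl0]
    rfl
  | some m =>
    dsimp only
    obtain ⟨k, hk, hkm⟩ := List.mem_map.mp (PySem.List.max?_mem hmax)
    have hkl : k ∈ l := (PySem.Set.mem_ofList l k).mp hk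
    have hmpos : 0 < m := by
      have : 0 < List.count k l := List.count_pos_iff.mpr hkl
      omega
    have hle : ∀ c ∈ l, ((List.count c l : Nat) : Int) ≤ m := by
      intro c hc
      have hcS : c ∈ PySem.Set.ofList l := (PySem.Set.mem_ofList l c).mpr hc
      simpa using PySem.List.max?_isMax hmax _ (List.mem_map_of_mem hcS)
    have hpred : (fun ch => (PySem.Dict.counter l).getD ch 0 == m)
        = (fun ch => ((List.count ch l : Nat) : Int) == m) := by
      funext ch
      rw [PySem.Dict.getD_counter]
    rw [hpred]
    have hfind : ∃ w, l.find? (fun c => ((List.count c l : Nat) : Int) == m) = some w := by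
      have : (l.find? (fun c => ((List.count c l : Nat) : Int) == m)).isSome :=
        List.find?_isSome.mpr ⟨k, hkl, by simp [hkm]⟩
      exact Option.isSome_iff_exists.mp this
    obtain ⟨w, hw⟩ := hfind
    rw [hw]
    have hstep := foldl_freq_spec (fun d => (PySem.Int.ofChars? [d]).getD 0)
      (fun c => ((List.count c l : Nat) : Int)) m l 0 0 w hle hw hmpos
    have hA : l.foldl (fun (st : Int × Int) digit =>
        if ((PySem.List.count l digit : Nat) : Int) > st.2
        then ((PySem.Int.ofChars? [digit]).getD 0, ((PySem.List.count l digit : Nat) : Int)) else st)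
        (0, 0) = ((PySem.Int.ofChars? [w]).getD 0, m) := by
      have hcnt : ∀ c : Char, (PySem.List.count l c : Int) = ((List.count c l : Nat) : Int) := by
        intro c; simp [PySem.List.count_eq]
      simpa only [hcnt] using hstep
    simp only [hA]

-- ===== VERDICT (by name: the statement is the Claim_ definition above) =====
theorem freq_digit_spec : Claim_equal_freq_digit := by
  intro num _ _
  unfold Spec_freq_digit
  exact freq_digit_eq num
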